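-- pv_equiv track=rewrite | github.com/dad/lcscore | src/quantify-separators.py | picketDistribution
-- ===== SOURCE A (Python) =====
-- def picketDistribution(s, posts, pickets, include_others=False):
-- 	seq = s
-- 	target_aas = posts + pickets
-- 	if not include_others:
-- 		# eliminate everything that's not a post or picket
-- 		seq = [aa for aa in seq if aa in target_aas]
-- 	post_inds = [xi for (xi,aa) in enumerate(seq) if aa in posts]
-- 	# Get distribution
-- 	res = []
-- 	for xi in range(len(post_inds)-1):
-- 		res.append(post_inds[xi+1]-post_inds[xi]-1)
-- 	return res
-- ===== SOURCE B (Python) =====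
-- def picketDistribution(s, posts, pickets, include_others=False):
-- 	target_aas = posts + pickets
-- 	res = []
-- 	count = 0
-- 	seen_post = False
-- 	for aa in s:
-- 		if not include_others and aa not in target_aas:
-- 			continue
-- 		if aa in posts:
-- 			if seen_post:
-- 				res.append(count)
-- 			seen_post = True
-- 			count = 0
-- 		else:
-- 			count += 1
-- 	return res
-- ===== Notes on version B (the rewrite author's own statement) =====
-- stated objective: alternative
-- what changed: Single fused pass over the sequence maintaining a running count of kept non-post elements and a seen_post flag, emitting each gap directly, instead of building the filtered list and a list of post indices and then differencing consecutive indices.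
import Mathlib
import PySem

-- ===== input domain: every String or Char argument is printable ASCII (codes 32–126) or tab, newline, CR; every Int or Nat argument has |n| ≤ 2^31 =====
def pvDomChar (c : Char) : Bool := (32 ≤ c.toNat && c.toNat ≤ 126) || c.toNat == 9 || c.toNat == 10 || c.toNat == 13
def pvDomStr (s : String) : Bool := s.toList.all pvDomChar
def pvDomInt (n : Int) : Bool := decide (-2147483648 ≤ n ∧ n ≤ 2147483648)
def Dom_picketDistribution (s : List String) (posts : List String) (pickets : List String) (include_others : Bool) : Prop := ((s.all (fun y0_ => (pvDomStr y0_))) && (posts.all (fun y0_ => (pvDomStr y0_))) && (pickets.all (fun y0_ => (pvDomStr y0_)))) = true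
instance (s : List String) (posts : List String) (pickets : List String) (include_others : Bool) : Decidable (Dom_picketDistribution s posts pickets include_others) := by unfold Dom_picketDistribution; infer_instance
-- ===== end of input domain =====

-- B is a single fused pass with a running counter and a seen-post flag (no index list); same cost class as A.

-- ===== PORT A =====
def picketDistribution (s : List String) (posts : List String) (pickets : List String) (include_others : Bool) : List Int :=
  let seq := s
  let target_aas := posts ++ pickets
  let seq := if !include_others then seq.filter (fun aa => target_aas.contains aa) else seq
  let post_inds : List Int :=
    ((PySem.List.enumerate seq).filter (fun p => posts.contains p.2)).map (fun p => p.1)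
  (PySem.List.pyRange 0 ((post_inds.length : Int) - 1) 1).foldl
    (fun res xi =>
      res ++ [(PySem.List.pyGetD post_inds (xi + 1) 0) - (PySem.List.pyGetD post_inds xi 0) - 1])
    []

-- ===== PORT B =====
def picketDistribution_alt (s : List String) (posts : List String) (pickets : List String) (include_others : Bool) : List Int :=
  let target_aas := posts ++ pickets
  let st := s.foldl
    (fun (st : List Int × Int × Bool) aa =>
      if !include_others && !target_aas.contains aa then st
      else if posts.contains aa then
        ((if st.2.2 then st.1 ++ [st.2.1] else st.1), 0, true)
      else (st.1, st.2.1 + 1, st.2.2))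
    ([], 0, false)
  st.1

-- ===== PRECONDITION & SPEC =====
def Spec_picketDistribution (s : List String) (posts : List String) (pickets : List String) (include_others : Bool) (out : List Int) : Prop := out = picketDistribution_alt s posts pickets include_others
instance (s : List String) (posts : List String) (pickets : List String) (include_others : Bool) (out : List Int) : Decidable (Spec_picketDistribution s posts pickets include_others out) := by unfold Spec_picketDistribution; infer_instance

-- ===== CLAIM (what is proved, stated in full; the proofs are below) =====
def Claim_equal_picketDistribution : Prop := ∀ (s : List String) (posts : List String) (pickets : List String) (include_others : Bool), Dom_picketDistribution s posts pickets include_others → Spec_picketDistribution s posts pickets include_others (picketDistribution s posts pickets include_others)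

-- ===== LEMMAS AND PROOFS =====

-- consecutive differences minus one
def pvDiffs : List Int → List Int
  | x :: y :: t => (y - x - 1) :: pvDiffs (y :: t)
  | _ => []

-- post indices of a sequence
def pvIdxs (posts : List String) (seq : List String) : List Int :=
  ((PySem.List.enumerate seq).filter (fun p => posts.contains p.2)).map (fun p => p.1)

-- B's inner step (the one taken on every kept element)
def pvStep (posts : List String) (st : List Int × Int × Bool) (aa : String) : List Int × Int × Bool :=
  if posts.contains aa then ((if st.2.2 then st.1 ++ [st.2.1] else st.1), 0, true)
  else (st.1, st.2.1 + 1, st.2.2)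

-- recursion form of B's pass over the kept elements
def pvGapsAux (posts : List String) : List String → Int → Bool → List Int
  | [], _, _ => []
  | aa :: t, c, seen =>
    if posts.contains aa then (if seen then [c] else []) ++ pvGapsAux posts t 0 true
    else pvGapsAux posts t (c + 1) seen

theorem pvDiffs_shift (d : Int) : ∀ (l : List Int), pvDiffs (l.map (· + d)) = pvDiffs l
  | [] => rfl
  | [_] => rfl
  | x :: y :: t => by
    have ih := pvDiffs_shift d (y :: t)
    simp only [List.map, pvDiffs] at ih ⊢
    rw [ih]
    congr 1
    ring

theorem pvIdxs_nil (posts : List String) : pvIdxs posts [] = [] := rfl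

theorem pvEnumShift (xs : List String) : ∀ (s : Int),
    PySem.List.enumerate xs (s + 1) = (PySem.List.enumerate xs s).map (fun p => (p.1 + 1, p.2)) := by
  induction xs with
  | nil => intro s; simp [PySem.List.enumerate_nil]
  | cons x t ih =>
    intro s
    rw [PySem.List.enumerate_cons, PySem.List.enumerate_cons, List.map_cons, ih (s + 1)]

theorem pvIdxs_cons (posts : List String) (a : String) (t : List String) :
    pvIdxs posts (a :: t) =
      (if posts.contains a then [(0 : Int)] else []) ++ (pvIdxs posts t).map (· + 1) := by
  unfold pvIdxs
  rw [PySem.List.enumerate_cons, pvEnumShift t 0]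
  simp only [List.filter_cons, List.filter_map, List.map_map, Function.comp_def]
  by_cases h : a ∈ posts <;> simp [h]

theorem pvShiftA (l : List Int) : pvDiffs ((0 : Int) :: l.map (· + 1)) = pvDiffs ((-1 : Int) :: l) := by
  rw [show ((0 : Int) :: l.map (· + 1)) = ((-1 : Int) :: l).map (· + 1) from by simp, pvDiffs_shift]

theorem pvShiftB (l : List Int) (c : Int) :
    pvDiffs ((-(c + 1)) :: (0 : Int) :: l.map (· + 1)) = c :: pvDiffs ((-1 : Int) :: l) := by
  rw [show pvDiffs ((-(c + 1)) :: (0 : Int) :: l.map (· + 1))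
      = ((0 : Int) - (-(c + 1)) - 1) :: pvDiffs ((0 : Int) :: l.map (· + 1)) from rfl, pvShiftA]
  congr 1
  ring

theorem pvShiftC (l : List Int) (c : Int) :
    pvDiffs ((-(c + 1)) :: l.map (· + 1)) = pvDiffs ((-(c + 1 + 1)) :: l) := by
  rw [show ((-(c + 1)) :: l.map (· + 1)) = ((-(c + 1 + 1)) :: l).map (· + 1) from by simp,
    pvDiffs_shift]

theorem pvGapsAux_eq (posts : List String) : ∀ (seq : List String) (c : Int) (seen : Bool),
    pvGapsAux posts seq c seen =
      if seen then pvDiffs ((-(c + 1)) :: pvIdxs posts seq) else pvDiffs (pvIdxs posts seq) := by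
  intro seq
  induction seq with
  | nil =>
    intro c seen
    cases seen <;> simp [pvGapsAux, pvIdxs_nil, pvDiffs]
  | cons a t ih =>
    intro c seen
    rw [pvIdxs_cons]
    by_cases hp : posts.contains a
    · cases seen
      · simp only [pvGapsAux, hp, if_true, Bool.false_eq_true, if_false, List.nil_append,
          ih 0 true, List.singleton_append]
        rw [show (-((0 : Int) + 1)) = (-1 : Int) from by ring, pvShiftA]
      · simp only [pvGapsAux, hp, if_true, ih 0 true, List.singleton_append]
        rw [show (-((0 : Int) + 1)) = (-1 : Int) from by ring, pvShiftB]
    · cases seen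
      · simp only [pvGapsAux, hp, Bool.false_eq_true, if_false, ih (c + 1) false,
          List.nil_append, pvDiffs_shift]
      · simp only [pvGapsAux, hp, Bool.false_eq_true, if_false, ih (c + 1) true, if_true,
          List.nil_append, pvShiftC]

-- B's fold equals the recursion form
theorem pvFold_eq_gapsAux (posts : List String) : ∀ (seq : List String) (res : List Int) (c : Int) (seen : Bool),
    (seq.foldl (pvStep posts) (res, c, seen)).1 = res ++ pvGapsAux posts seq c seen := by
  intro seq
  induction seq with
  | nil => intro res c seen; simp [pvGapsAux]
  | cons a t ih =>
    intro res c seen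
    by_cases hp : a ∈ posts
    · cases seen <;> simp [List.foldl_cons, pvStep, hp, pvGapsAux, ih]
    · simp [List.foldl_cons, pvStep, hp, pvGapsAux, ih]

-- skipping in B's pass over s equals B's pass over the filtered sequence
theorem pvFold_filter (posts target : List String) : ∀ (s : List String) (st : List Int × Int × Bool),
    s.foldl (fun st aa => if !target.contains aa then st else pvStep posts st aa) st
      = (s.filter (fun aa => target.contains aa)).foldl (pvStep posts) st := by
  intro s
  induction s with
  | nil => intro st; rfl
  | cons a t ih =>
    intro st
    by_cases ht : target.contains a = true
    · rw [List.foldl_cons, if_neg (by simpa using ht), List.filter_cons, if_pos (by simpa using ht), List.foldl_cons]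
      exact ih _
    · rw [List.foldl_cons, if_pos (by simpa using ht), List.filter_cons, if_neg (by simpa using ht)]
      exact ih _

theorem pvMapRangeDiffs : ∀ (l : List Int),
    (PySem.List.pyRange 0 ((l.length : Int) - 1) 1).map
      (fun xi => PySem.List.pyGetD l (xi + 1) 0 - PySem.List.pyGetD l xi 0 - 1) = pvDiffs l
  | [] => by
    rw [PySem.List.pyRange_one_eq_nil (by simp)]; rfl
  | [x] => by
    rw [PySem.List.pyRange_one_eq_nil (by simp)]
    simp [pvDiffs]
  | x :: y :: t => by
    have hlen : ((x :: y :: t).length : Int) - 1 = ((y :: t).length : Int) := by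
      push_cast [List.length_cons]
      ring
    rw [hlen, PySem.List.pyRange_one_cons (by exact_mod_cast Nat.succ_pos t.length), List.map_cons]
    have htail : (PySem.List.pyRange 1 ((y :: t).length : Int) 1).map
        (fun xi => PySem.List.pyGetD (x :: y :: t) (xi + 1) 0 - PySem.List.pyGetD (x :: y :: t) xi 0 - 1)
        = pvDiffs (y :: t) := by
      rw [← pvMapRangeDiffs (y :: t)]
      have h1 : PySem.List.pyRange 1 ((y :: t).length : Int) 1
          = (PySem.List.pyRange 0 (((y :: t).length : Int) - 1) 1).map (· + 1) := by
        rw [PySem.List.pyRange_one, PySem.List.pyRange_one, List.map_map]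
        have : ((((y :: t).length : Int)) - 1 - 0).toNat = (((y :: t).length : Int) - 1).toNat := by
          simp
        rw [this]
        apply List.map_congr_left
        intro k _
        simp [Function.comp]
        ring
      rw [h1, List.map_map]
      apply List.map_congr_left
      intro xi hxi
      have hnn : 0 ≤ xi := by
        rw [PySem.List.mem_pyRange_one] at hxi
        exact hxi.1
      obtain ⟨n, rfl⟩ := Int.eq_ofNat_of_zero_le hnn
      simp only [Function.comp]
      have e1 : ((n : Int) + 1 + 1) = ((n + 2 : Nat) : Int) := by push_cast; ring
      have e2 : ((n : Int) + 1) = ((n + 1 : Nat) : Int) := by push_cast; ring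
      rw [e1, e2, PySem.List.pyGetD_natCast, PySem.List.pyGetD_natCast,
        PySem.List.pyGetD_natCast, PySem.List.pyGetD_natCast]
      simp [List.getD]
    simp only [zero_add] at *
    rw [htail]
    have hhead : PySem.List.pyGetD (x :: y :: t) (1 : Int) 0 - PySem.List.pyGetD (x :: y :: t) 0 0 - 1 = y - x - 1 := by
      rw [show (1 : Int) = ((1 : Nat) : Int) by norm_num, PySem.List.pyGetD_natCast,
        PySem.List.pyGetD_zero_cons]
      simp [List.getD]
    rw [hhead]
    rfl

-- A's range loop computes the consecutive differences
theorem pvLoopA (l : List Int) :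
    (PySem.List.pyRange 0 ((l.length : Int) - 1) 1).foldl
      (fun res xi => res ++ [(PySem.List.pyGetD l (xi + 1) 0) - (PySem.List.pyGetD l xi 0) - 1]) []
      = pvDiffs l := by
  rw [PySem.List.foldl_append_singleton_eq_map, List.nil_append]
  exact pvMapRangeDiffs l

theorem pvMain (seq posts : List String) :
    (seq.foldl (pvStep posts) ([], 0, false)).1 = pvDiffs (pvIdxs posts seq) := by
  rw [pvFold_eq_gapsAux, pvGapsAux_eq]
  simp

-- ===== VERDICT (by name: the statement is the Claim_ definition above) =====
theorem picketDistribution_spec : Claim_equal_picketDistribution := by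
  intro s posts pickets include_others _
  unfold Spec_picketDistribution
  cases include_others with
  | false =>
    have h1 : picketDistribution s posts pickets false
        = pvDiffs (pvIdxs posts (s.filter (fun aa => (posts ++ pickets).contains aa))) :=
      pvLoopA (pvIdxs posts (s.filter (fun aa => (posts ++ pickets).contains aa)))
    have h2 : picketDistribution_alt s posts pickets false
        = pvDiffs (pvIdxs posts (s.filter (fun aa => (posts ++ pickets).contains aa))) := by
      have hf := pvFold_filter posts (posts ++ pickets) s ([], 0, false)
      calc picketDistribution_alt s posts pickets false
          = (List.foldl (fun st aa =>
              if !(posts ++ pickets).contains aa then st else pvStep posts st aa) ([], 0, false) s).1 := rfl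
        _ = (List.foldl (pvStep posts) ([], 0, false)
              (s.filter (fun aa => (posts ++ pickets).contains aa))).1 := by rw [hf]
        _ = _ := pvMain _ posts
    exact h1.trans h2.symm
  | true =>
    have h1 : picketDistribution s posts pickets true = pvDiffs (pvIdxs posts s) :=
      pvLoopA (pvIdxs posts s)
    have h2 : picketDistribution_alt s posts pickets true = pvDiffs (pvIdxs posts s) := by
      calc picketDistribution_alt s posts pickets true
          = (List.foldl (pvStep posts) ([], 0, false) s).1 := rfl
        _ = _ := pvMain s posts
    exact h1.trans h2.symm
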